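-- pv_equiv track=rewrite | github.com/joeriben/ai4artsed_webserver | devserver/schemas/engine/stage_orchestrator.py | _fuzzy_contains
-- ===== SOURCE A (Python) =====
-- def _levenshtein(s1: str, s2: str) -> int:
--     """Simple Levenshtein distance (stdlib-only, no dependencies)"""
--     if len(s1) < len(s2):
--         return _levenshtein(s2, s1)
--     if len(s2) == 0:
--         return len(s1)
--     prev_row = list(range(len(s2) + 1))
--     for i, c1 in enumerate(s1):
--         curr_row = [i + 1]
--         for j, c2 in enumerate(s2):
--             curr_row.append(min(
--                 prev_row[j + 1] + 1,   # insertion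
--                 curr_row[j] + 1,        # deletion
--                 prev_row[j] + (c1 != c2)  # substitution
--             ))
--         prev_row = curr_row
--     return prev_row[-1]
--
-- def _fuzzy_contains(text_lower: str, term: str, max_distance: int = 2) -> bool:
--     """Check if any word/phrase in text fuzzy-matches term within Levenshtein distance"""
--     term_len = len(term)
--     words = text_lower.split()
--
--     if ' ' in term:
--         # Multi-word term (e.g., "heil hitler"): check word combinations
--         term_word_count = len(term.split())
--         for i in range(len(words)):
--             for j in range(i + 1, min(i + term_word_count + 1, len(words) + 1)):
--                 combo = ' '.join(words[i:j])
--                 if abs(len(combo) - term_len) <= max_distance: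
--                     if _levenshtein(combo, term) <= max_distance:
--                         return True
--     else:
--         # Single-word term: check each word individually
--         for word in words:
--             if abs(len(word) - term_len) <= max_distance:
--                 if _levenshtein(word, term) <= max_distance:
--                     return True
--     return False
-- ===== SOURCE B (Python) =====
-- def _lev(a: str, b: str) -> int:
--     """Edit distance by memoized top-down recursion on prefix lengths."""
--     memo = {}
--     def d(i, j):
--         if i == 0:
--             return j
--         if j == 0:
--             return i
--         key = (i, j)
--         if key in memo:
--             return memo[key]
--         cost = 0 if a[i - 1] == b[j - 1] else 1
--         r = min(d(i - 1, j) + 1, d(i, j - 1) + 1, d(i - 1, j - 1) + cost)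
--         memo[key] = r
--         return r
--     return d(len(a), len(b))
--
-- def _fuzzy_contains(text_lower: str, term: str, max_distance: int = 2) -> bool:
--     words = text_lower.split()
--     if ' ' in term:
--         n = len(term.split())
--         cands = [' '.join(words[i:i + w])
--                  for i in range(len(words))
--                  for w in range(1, n + 1)
--                  if i + w <= len(words)]
--     else:
--         cands = words
--     # no length pre-filter: dist(a, b) >= |len(a) - len(b)|, so it is redundant
--     return any(_lev(c, term) <= max_distance for c in cands)
-- ===== Notes on version B (the rewrite author's own statement) =====
-- stated objective: alternative
-- what changed: B computes the edit distance by memoized top-down recursion on prefix lengths instead of A's bottom-up two-row table, drops A's length-difference pre-filter as redundant (distance >= length gap), and materialises the candidate word-window strings in one comprehension before a single any() pass.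
import Mathlib
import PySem

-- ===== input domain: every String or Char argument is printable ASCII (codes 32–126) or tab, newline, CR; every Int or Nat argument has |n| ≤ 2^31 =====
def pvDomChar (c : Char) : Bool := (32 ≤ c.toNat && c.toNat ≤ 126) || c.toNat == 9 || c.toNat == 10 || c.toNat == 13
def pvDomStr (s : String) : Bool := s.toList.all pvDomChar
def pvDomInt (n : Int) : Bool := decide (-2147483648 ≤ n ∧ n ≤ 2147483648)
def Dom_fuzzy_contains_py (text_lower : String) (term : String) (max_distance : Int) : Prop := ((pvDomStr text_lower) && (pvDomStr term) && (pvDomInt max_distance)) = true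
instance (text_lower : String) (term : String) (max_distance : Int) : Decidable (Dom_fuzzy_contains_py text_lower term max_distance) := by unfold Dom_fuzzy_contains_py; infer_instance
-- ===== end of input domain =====

-- B computes the edit distance by memoized top-down recursion on prefix lengths instead of
-- A's bottom-up two-row table, drops A's redundant length-difference pre-filter, and builds
-- the candidate windows in one comprehension before a single any() pass (objective: alternative).

-- ===== PORT A =====
-- inner loop of _levenshtein: builds curr_row by appending, indexing into prev_row/curr_row
def pvLevRow (c1 : Char) (s2 : List Char) (prev : List Nat) (i : Nat) : List Nat :=
  (s2.zipIdx).foldl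
    (fun curr p =>
      curr ++ [min (prev.getD (p.2 + 1) 0 + 1)
                 (min (curr.getD p.2 0 + 1)
                      (prev.getD p.2 0 + (if c1 ≠ p.1 then 1 else 0)))])
    [i + 1]

-- _levenshtein after the one-level swap recursion (len(s1) >= len(s2) here)
def pvLevMain (s1 s2 : List Char) : Nat :=
  if s2.length = 0 then s1.length
  else
    ((s1.zipIdx).foldl (fun prev p => pvLevRow p.1 s2 prev p.2)
      (List.range (s2.length + 1))).getLastD 0

def pvLevenshtein (s1 s2 : List Char) : Nat :=
  if s1.length < s2.length then pvLevMain s2 s1 else pvLevMain s1 s2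

def fuzzy_contains_py (text_lower : String) (term : String) (max_distance : Int) : Bool :=
  let term_len : Int := term.toList.length
  let words := PySem.Chars.split₀ text_lower.toList
  if PySem.Chars.isIn [' '] term.toList then
    let term_word_count := (PySem.Chars.split₀ term.toList).length
    (List.range words.length).any fun i =>
      (PySem.List.pyRange ((i : Int) + 1)
          (min ((i : Int) + term_word_count + 1) ((words.length : Int) + 1)) 1).any fun j =>
        let combo := PySem.Chars.join [' '] (PySem.List.slice words (some (i : Int)) (some j))
        decide (|(combo.length : Int) - term_len| ≤ max_distance) &&
        decide ((pvLevenshtein combo term.toList : Int) ≤ max_distance)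
  else
    words.any fun w =>
      decide (|(w.length : Int) - term_len| ≤ max_distance) &&
      decide ((pvLevenshtein w term.toList : Int) ≤ max_distance)

-- ===== PORT B =====
-- B's memoized recursion d(i, j) with the dict threaded through the calls
-- (a[i-1] / b[j-1] are only read with 1 ≤ i ≤ |a|, 1 ≤ j ≤ |b|, where getD is exact)
def pvLevMemoGo (a b : List Char) :
    Nat → Nat → PySem.Dict (Nat × Nat) Nat → Nat × PySem.Dict (Nat × Nat) Nat
  | 0, j, m => (j, m)
  | i+1, 0, m => (i+1, m)
  | i+1, j+1, m =>
    match PySem.Dict.get? m (i+1, j+1) with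
    | some v => (v, m)
    | none =>
      let cost : Nat := if a.getD i ' ' = b.getD j ' ' then 0 else 1
      let r1 := pvLevMemoGo a b i (j+1) m
      let r2 := pvLevMemoGo a b (i+1) j r1.2
      let r3 := pvLevMemoGo a b i j r2.2
      let r := min (r1.1 + 1) (min (r2.1 + 1) (r3.1 + cost))
      (r, PySem.Dict.insert r3.2 (i+1, j+1) r)
  termination_by i j _ => i + j
  decreasing_by all_goals omega

-- _lev(a, b): d(len(a), len(b)) with a fresh memo
def pvLev (a b : List Char) : Nat :=
  (pvLevMemoGo a b a.length b.length PySem.Dict.empty).1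

def fuzzy_contains_py_alt (text_lower : String) (term : String) (max_distance : Int) : Bool :=
  let words := PySem.Chars.split₀ text_lower.toList
  let cands :=
    if PySem.Chars.isIn [' '] term.toList then
      (List.range words.length).flatMap fun (i : Nat) =>
        (PySem.List.pyRange 1 (((PySem.Chars.split₀ term.toList).length : Int) + 1) 1).filterMap
          fun w =>
            if (i : Int) + w ≤ (words.length : Int) then
              some (PySem.Chars.join [' ']
                (PySem.List.slice words (some (i : Int)) (some ((i : Int) + w))))
            else none
    else words
  cands.any fun c => decide ((pvLev c term.toList : Int) ≤ max_distance)

-- ===== PRECONDITION & SPEC =====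
def Spec_fuzzy_contains_py (text_lower : String) (term : String) (max_distance : Int) (out : Bool) : Prop := out = fuzzy_contains_py_alt text_lower term max_distance
instance (text_lower : String) (term : String) (max_distance : Int) (out : Bool) : Decidable (Spec_fuzzy_contains_py text_lower term max_distance out) := by unfold Spec_fuzzy_contains_py; infer_instance

-- ===== CLAIM (what is proved, stated in full; the proofs are below) =====
def Claim_equal_fuzzy_contains_py : Prop := ∀ (text_lower : String) (term : String) (max_distance : Int), Dom_fuzzy_contains_py text_lower term max_distance → Spec_fuzzy_contains_py text_lower term max_distance (fuzzy_contains_py text_lower term max_distance)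

-- ===== LEMMAS AND PROOFS =====

-- the textbook edit-distance recursion, the common reference point of both ports
def pvLevRec (a b : List Char) : Nat → Nat → Nat
  | 0, j => j
  | i+1, 0 => i+1
  | i+1, j+1 =>
    min (pvLevRec a b i (j+1) + 1)
      (min (pvLevRec a b (i+1) j + 1)
        (pvLevRec a b i j + (if a.getD i ' ' = b.getD j ' ' then 0 else 1)))
  termination_by i j => i + j
  decreasing_by all_goals omega

theorem pvLevRec_zero_right (a b : List Char) (i : Nat) : pvLevRec a b i 0 = i := by
  cases i <;> simp [pvLevRec]

-- the distance dominates the length gap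
theorem pvLevRec_ge_gap (a b : List Char) :
    ∀ (n i j : Nat), i + j ≤ n → i ≤ pvLevRec a b i j + j ∧ j ≤ pvLevRec a b i j + i := by
  intro n
  induction n with
  | zero =>
    intro i j h
    obtain rfl : i = 0 := by omega
    obtain rfl : j = 0 := by omega
    simp [pvLevRec]
  | succ n ih =>
    intro i j h
    match i, j with
    | 0, j => simp [pvLevRec]
    | i+1, 0 => simp [pvLevRec]
    | i+1, j+1 =>
      have h1 := ih i (j+1) (by omega)
      have h2 := ih (i+1) j (by omega)
      have h3 := ih i j (by omega)
      rw [pvLevRec]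
      split_ifs <;> omega

-- symmetry of the recursion
theorem pvLevRec_symm (a b : List Char) :
    ∀ (n i j : Nat), i + j ≤ n → pvLevRec a b i j = pvLevRec b a j i := by
  intro n
  induction n with
  | zero =>
    intro i j h
    obtain rfl : i = 0 := by omega
    obtain rfl : j = 0 := by omega
    simp [pvLevRec]
  | succ n ih =>
    intro i j h
    match i, j with
    | 0, 0 => simp [pvLevRec]
    | 0, j+1 => simp [pvLevRec]
    | i+1, 0 => simp [pvLevRec]
    | i+1, j+1 =>
      have h1 := ih i (j+1) (by omega)
      have h2 := ih (i+1) j (by omega)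
      have h3 := ih i j (by omega)
      rw [pvLevRec, pvLevRec, h1, h2, h3]
      have hc : (if a.getD i ' ' = b.getD j ' ' then (0:Nat) else 1)
          = (if b.getD j ' ' = a.getD i ' ' then (0:Nat) else 1) := by
        simp [eq_comm]
      rw [hc]
      generalize (if b.getD j ' ' = a.getD i ' ' then (0:Nat) else 1) = c
      omega

-- ---- A's two-row DP computes pvLevRec ----

-- structural view of one row (proof device for pvLevRow)
def pvRowGo (ca : Char) : Nat → List Nat → List Char → Nat → List Nat
  | pj, pj1 :: prest, cb :: brest, last =>
      let v := min (pj1 + 1) (min (last + 1) (pj + (if ca ≠ cb then 1 else 0)))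
      v :: pvRowGo ca pj1 prest brest v
  | _, _, _, _ => []

theorem pvRowGo_nil_b (ca : Char) (pj : Nat) (prest : List Nat) (last : Nat) :
    pvRowGo ca pj prest [] last = [] := by cases prest <;> rfl

theorem getD_last_of_len (acc : List Nat) (j : Nat) (h : acc.length = j + 1) :
    acc.getD j 0 = acc.getLastD 0 := by
  rw [List.getD_eq_getElem?_getD, List.getLastD_eq_getLast?, List.getLast?_eq_getElem?, h]
  simp

-- A's append-and-index row fold equals the structural row walk
theorem pvLevRow_aux (ca : Char) (prev : List Nat) :
    ∀ (b' : List Char) (j : Nat) (acc : List Nat) (last : Nat),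
      acc.length = j + 1 → acc.getLastD 0 = last → j + b'.length + 1 = prev.length →
      (b'.zipIdx j).foldl
        (fun curr p =>
          curr ++ [min (prev.getD (p.2 + 1) 0 + 1)
                    (min (curr.getD p.2 0 + 1)
                         (prev.getD p.2 0 + (if ca ≠ p.1 then 1 else 0)))]) acc
      = acc ++ pvRowGo ca (prev.getD j 0) (prev.drop (j + 1)) b' last := by
  intro b'
  induction b' with
  | nil =>
    intro j acc last _ _ _
    simp [pvRowGo_nil_b]
  | cons cb rest ih =>
    intro j acc last hlen hlast hplen
    have hj1 : j + 1 < prev.length := by simp at hplen; omega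
    have hdrop : prev.drop (j + 1) = prev[j + 1] :: prev.drop (j + 2) :=
      List.drop_eq_getElem_cons hj1
    have hgd : prev.getD (j + 1) 0 = prev[j + 1] := by
      rw [List.getD_eq_getElem?_getD, List.getElem?_eq_getElem hj1]; rfl
    have haccj : acc.getD j 0 = last := by rw [getD_last_of_len acc j hlen, hlast]
    simp only [List.zipIdx_cons, List.foldl_cons]
    rw [haccj]
    set v := min (prev.getD (j + 1) 0 + 1)
        (min (last + 1) (prev.getD j 0 + (if ca ≠ cb then 1 else 0))) with hv
    rw [ih (j + 1) (acc ++ [v]) v (by simp [hlen]) (by simp) (by simp at hplen ⊢; omega)]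
    rw [hdrop]
    show acc ++ [v] ++ _ = acc ++ pvRowGo ca (prev.getD j 0) (prev[j+1] :: prev.drop (j+2)) (cb :: rest) last
    simp only [pvRowGo, List.append_assoc, List.singleton_append]
    rw [hv, hgd]

theorem pvLevRow_eq_rowGo (ca : Char) (b : List Char) (prev : List Nat) (i : Nat)
    (h : prev.length = b.length + 1) :
    pvLevRow ca b prev i = (i + 1) :: pvRowGo ca (prev.headD 0) prev.tail b (i + 1) := by
  have h0 : prev.getD 0 0 = prev.headD 0 := by cases prev <;> rfl
  have := pvLevRow_aux ca prev b 0 [i + 1] (i + 1) (by simp) (by simp) (by omega)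
  unfold pvLevRow
  rw [this, h0]
  simp [List.drop_one]

-- the structural row walk maps pvLevRec row i to row i+1
theorem pvRowGo_rec (a b : List Char) (i : Nat) :
    ∀ (bsuf : List Char) (j : Nat), j + bsuf.length = b.length → b.drop j = bsuf →
      pvRowGo (a.getD i ' ') (pvLevRec a b i j)
        ((List.range' (j + 1) bsuf.length).map (pvLevRec a b i)) bsuf
        (pvLevRec a b (i + 1) j)
      = (List.range' (j + 1) bsuf.length).map (pvLevRec a b (i + 1)) := by
  intro bsuf
  induction bsuf with
  | nil => intro j _ _; simp [pvRowGo]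
  | cons cb rest ih =>
    intro j hlen hdrop
    have hj : j < b.length := by simp at hlen; omega
    have hcb : b.getD j ' ' = cb := by
      have : b[j] = cb := by
        have := List.drop_eq_getElem_cons hj
        rw [hdrop] at this
        exact (List.cons.injEq _ _ _ _ ▸ this).1.symm
      rw [List.getD_eq_getElem?_getD, List.getElem?_eq_getElem hj, this]; rfl
    simp only [List.length_cons, List.range'_succ, List.map_cons]
    rw [pvRowGo]
    have hv : min (pvLevRec a b i (j+1) + 1)
        (min (pvLevRec a b (i+1) j + 1)
          (pvLevRec a b i j + (if a.getD i ' ' ≠ cb then 1 else 0)))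
        = pvLevRec a b (i+1) (j+1) := by
      rw [pvLevRec]
      congr 2
      rw [hcb, ite_not]
    rw [hv]
    congr 1
    have hd2 : List.drop (j + 1) b = rest := by
      have := congrArg (List.drop 1) hdrop
      simpa [List.drop_drop, Nat.add_comm] using this
    exact ih (j + 1) (by simp at hlen ⊢; omega) hd2

-- one step of A's outer fold
theorem pvLevRow_rec (a b : List Char) (i : Nat) :
    pvLevRow (a.getD i ' ') b ((List.range (b.length + 1)).map (pvLevRec a b i)) i
      = (List.range (b.length + 1)).map (pvLevRec a b (i + 1)) := by
  have hrow : ∀ k : Nat, (List.range (b.length + 1)).map (pvLevRec a b k)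
      = k :: (List.range' 1 b.length).map (pvLevRec a b k) := by
    intro k
    rw [List.range_eq_range', List.range'_succ, List.map_cons, pvLevRec_zero_right]
  rw [hrow i, pvLevRow_eq_rowGo _ _ _ _ (by simp), hrow (i + 1)]
  simp only [List.headD_cons, List.tail_cons]
  congr 1
  have h0 := pvRowGo_rec a b i b 0 (by simp) (by simp)
  rw [pvLevRec_zero_right, pvLevRec_zero_right] at h0
  simpa using h0

theorem pvLevFold_rec (a b : List Char) :
    ∀ (asuf : List Char) (i : Nat), a.drop i = asuf →
      (asuf.zipIdx i).foldl (fun prev p => pvLevRow p.1 b prev p.2)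
          ((List.range (b.length + 1)).map (pvLevRec a b i))
        = (List.range (b.length + 1)).map (pvLevRec a b (i + asuf.length)) := by
  intro asuf
  induction asuf with
  | nil => intro i _; simp
  | cons ca rest ih =>
    intro i hdrop
    have hi : i < a.length := by
      have := congrArg List.length hdrop
      simp at this; omega
    have hca : a.getD i ' ' = ca := by
      have : a[i] = ca := by
        have := List.drop_eq_getElem_cons hi
        rw [hdrop] at this
        exact (List.cons.injEq _ _ _ _ ▸ this).1.symm
      rw [List.getD_eq_getElem?_getD, List.getElem?_eq_getElem hi, this]; rfl
    have hd2 : List.drop (i + 1) a = rest := by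
      have := congrArg (List.drop 1) hdrop
      simpa [List.drop_drop, Nat.add_comm] using this
    simp only [List.zipIdx_cons, List.foldl_cons]
    rw [← hca, pvLevRow_rec, ih (i + 1) hd2]
    congr 2
    simp
    omega

theorem pvLevMain_rec (a b : List Char) : pvLevMain a b = pvLevRec a b a.length b.length := by
  unfold pvLevMain
  by_cases hb : b.length = 0
  · rw [if_pos hb, hb, pvLevRec_zero_right]
  · rw [if_neg hb]
    have h0 : List.range (b.length + 1) = (List.range (b.length + 1)).map (pvLevRec a b 0) := by
      symm
      rw [show (List.range (b.length + 1)).map (pvLevRec a b 0)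
            = (List.range (b.length + 1)).map id from
          List.map_congr_left (fun j _ => by simp [pvLevRec]), List.map_id]
    rw [h0, pvLevFold_rec a b a (0 : Nat) (by simp), Nat.zero_add]
    rw [List.range_succ, List.map_append]
    simp

theorem pvLevenshtein_rec (s1 s2 : List Char) :
    pvLevenshtein s1 s2 = pvLevRec s1 s2 s1.length s2.length := by
  unfold pvLevenshtein
  by_cases h : s1.length < s2.length
  · rw [if_pos h, pvLevMain_rec,
      pvLevRec_symm s2 s1 (s2.length + s1.length) s2.length s1.length (by omega)]
  · rw [if_neg h, pvLevMain_rec]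

-- ---- B's memoized recursion computes pvLevRec ----

def pvMemoOK (a b : List Char) (m : PySem.Dict (Nat × Nat) Nat) : Prop :=
  ∀ p v, m.get? p = some v → v = pvLevRec a b p.1 p.2

theorem pvLevMemoGo_spec (a b : List Char) :
    ∀ (n i j : Nat), i + j ≤ n → ∀ m, pvMemoOK a b m →
      (pvLevMemoGo a b i j m).1 = pvLevRec a b i j ∧ pvMemoOK a b (pvLevMemoGo a b i j m).2 := by
  intro n
  induction n with
  | zero =>
    intro i j h m hm
    obtain rfl : i = 0 := by omega
    obtain rfl : j = 0 := by omega
    exact ⟨by simp [pvLevMemoGo, pvLevRec], by simpa [pvLevMemoGo] using hm⟩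
  | succ n ih =>
    intro i j h m hm
    match i, j with
    | 0, j => exact ⟨by simp [pvLevMemoGo, pvLevRec], by simpa [pvLevMemoGo] using hm⟩
    | i+1, 0 => exact ⟨by simp [pvLevMemoGo, pvLevRec], by simpa [pvLevMemoGo] using hm⟩
    | i+1, j+1 =>
      cases hg : PySem.Dict.get? m (i+1, j+1) with
      | some v =>
        refine ⟨?_, ?_⟩
        · rw [pvLevMemoGo, hg]
          exact hm (i+1, j+1) v hg
        · rw [pvLevMemoGo, hg]
          exact hm
      | none =>
        obtain ⟨e1, k1⟩ := ih i (j+1) (by omega) m hm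
        obtain ⟨e2, k2⟩ := ih (i+1) j (by omega) _ k1
        obtain ⟨e3, k3⟩ := ih i j (by omega) _ k2
        refine ⟨?_, ?_⟩
        · rw [pvLevMemoGo, hg]
          simp only [e1, e2, e3]
          rw [pvLevRec]
        · rw [pvLevMemoGo, hg]
          intro p v hp
          simp only at hp
          rw [PySem.Dict.get?_insert] at hp
          by_cases hpk : p = (i+1, j+1)
          · rw [if_pos hpk] at hp
            obtain rfl : v = _ := (Option.some.injEq _ _ ▸ hp).symm
            subst hpk
            simp only [e1, e2, e3]
            rw [pvLevRec]
          · rw [if_neg hpk] at hp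
            exact k3 p v hp

theorem pvLev_rec (a b : List Char) : pvLev a b = pvLevRec a b a.length b.length := by
  exact (pvLevMemoGo_spec a b (a.length + b.length) a.length b.length (le_refl _)
    PySem.Dict.empty (fun p v hp => by simp [PySem.Dict.get?_empty] at hp)).1

-- ---- glue ----

theorem any_congr_mem {α : Type} (l : List α) (p q : α → Bool)
    (h : ∀ x ∈ l, p x = q x) : l.any p = l.any q := by
  induction l with
  | nil => rfl
  | cons a t ih => simp only [List.any_cons, h a (by simp), ih (fun x hx => h x (by simp [hx]))]

theorem pyRange_add_eq_map (a : Int) (r : Nat) :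
    PySem.List.pyRange a (a + r) 1 = (List.range r).map (fun n : Nat => a + (n : Int)) := by
  rw [PySem.List.pyRange_of_pos a (a + r) one_pos]
  have h2 : (a + (r : Int) - a + 1 - 1) = (r : Int) := by ring
  rw [h2, Int.ediv_one, Int.toNat_natCast]
  by_cases hr : a < a + (r : Int)
  · rw [if_pos hr]
    apply List.map_congr_left
    intro n _
    ring
  · rw [if_neg hr]
    have : r = 0 := by omega
    subst this
    simp

-- the length filter is absorbed by the distance test
theorem pvFilter_absorb (c t : List Char) (k : Int) :
    (decide (|(c.length : Int) - (t.length : Int)| ≤ k) &&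
      decide ((pvLevRec c t c.length t.length : Int) ≤ k))
    = decide ((pvLevRec c t c.length t.length : Int) ≤ k) := by
  by_cases hd : (pvLevRec c t c.length t.length : Int) ≤ k
  · have gap := pvLevRec_ge_gap c t (c.length + t.length) c.length t.length (le_refl _)
    have habs : |(c.length : Int) - (t.length : Int)| ≤ k := by
      rw [abs_le]
      push_cast at hd ⊢
      omega
    simp [hd, habs]
  · simp [hd]

-- filterMap over range with a prefix guard is a map over the shorter range
theorem filterMap_range_guard {α : Type} (g : Nat → α) (L i : Nat) (n r : Nat)
    (hr : r = min n (L - i)) (hiL : i ≤ L) :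
    ((List.range n).filterMap fun (t : Nat) =>
        if (i : Int) + (1 + (t : Int)) ≤ (L : Int) then some (g t) else none)
      = (List.range r).map g := by
  rw [show n = r + (n - r) by omega, List.range_add, List.filterMap_append, List.filterMap_map]
  have h1 : (List.range r).filterMap
      (fun (t : Nat) => if (i : Int) + (1 + (t : Int)) ≤ (L : Int) then some (g t) else none)
      = (List.range r).map g := by
    rw [List.filterMap_congr (g := fun (t : Nat) => some (g t)) ?_]
    · exact congrFun (List.filterMap_eq_map (f := g)) (List.range r)
    intro t ht
    rw [if_pos]
    have := List.mem_range.mp ht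
    omega
  have h2 : (List.range (n - r)).filterMap
      ((fun (t : Nat) => if (i : Int) + (1 + (t : Int)) ≤ (L : Int) then some (g t) else none) ∘
        (fun (s : Nat) => r + s))
      = [] := by
    rw [List.filterMap_eq_nil_iff]
    intro t ht
    have htr := List.mem_range.mp (by simpa using ht : t ∈ List.range (n - r))
    simp only [Function.comp_apply]
    rw [if_neg]
    push_cast
    omega
  rw [h1, h2, List.append_nil]

-- the two inner scans agree for every window start i
theorem pvInner_eq (words : List (List Char)) (t : List Char) (twc : Nat) (k : Int)
    (i : Nat) (hi : i < words.length) :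
    ((PySem.List.pyRange ((i : Int) + 1)
        (min ((i : Int) + twc + 1) ((words.length : Int) + 1)) 1).any fun j =>
          (decide (|((PySem.Chars.join [' '] (PySem.List.slice words (some (i : Int)) (some j))).length : Int) - (t.length : Int)| ≤ k) &&
           decide ((pvLevenshtein (PySem.Chars.join [' '] (PySem.List.slice words (some (i : Int)) (some j))) t : Int) ≤ k)))
    = ((PySem.List.pyRange 1 ((twc : Int) + 1) 1).filterMap fun w =>
        if (i : Int) + w ≤ (words.length : Int) then
          some (PySem.Chars.join [' '] (PySem.List.slice words (some (i : Int)) (some ((i : Int) + w))))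
        else none).any fun c => decide ((pvLev c t : Int) ≤ k) := by
  have hmin : min ((i : Int) + twc + 1) ((words.length : Int) + 1)
      = ((i : Int) + 1) + ((min twc (words.length - i) : Nat) : Int) := by
    push_cast
    omega
  rw [hmin, pyRange_add_eq_map ((i : Int) + 1) (min twc (words.length - i)), List.any_map]
  rw [show ((twc : Int) + 1) = (1 : Int) + (twc : Nat) by ring,
    pyRange_add_eq_map 1 twc, List.filterMap_map]
  simp only [Function.comp_def]
  rw [filterMap_range_guard
      (fun (w : Nat) => PySem.Chars.join [' ']
        (PySem.List.slice words (some (i : Int)) (some ((i : Int) + (1 + (w : Int))))))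
      words.length i twc (min twc (words.length - i)) rfl (by omega),
    List.any_map]
  apply any_congr_mem
  intro w hw
  simp only [Function.comp_apply]
  rw [show (i : Int) + 1 + (w : Int) = (i : Int) + (1 + (w : Int)) by ring]
  rw [pvLevenshtein_rec, pvFilter_absorb, ← pvLev_rec]

-- ===== VERDICT (by name: the statement is the Claim_ definition above) =====
theorem fuzzy_contains_py_spec : Claim_equal_fuzzy_contains_py := by
  intro text_lower term max_distance _
  unfold Spec_fuzzy_contains_py fuzzy_contains_py fuzzy_contains_py_alt
  by_cases hsp : PySem.Chars.isIn [' '] term.toList = true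
  · simp only [hsp, if_true]
    rw [List.any_flatMap]
    apply any_congr_mem
    intro i hi
    exact pvInner_eq (PySem.Chars.split₀ text_lower.toList) term.toList
      ((PySem.Chars.split₀ term.toList).length) max_distance i (List.mem_range.mp hi)
  · simp only [Bool.not_eq_true] at hsp
    simp only [hsp, Bool.false_eq_true, if_false]
    apply any_congr_mem
    intro w _
    rw [pvLevenshtein_rec, pvLev_rec, pvFilter_absorb w term.toList]
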